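-- pv_equiv track=rewrite | github.com/BartlomiejRegula/pp1 | 13-Test3/p1.py | f
-- ===== SOURCE A (Python) =====
-- def f(n):
--     # res=""
--     # for i in range(n):
--     #     if n<=0:
--     #         return res
--     #     if i!=0 and i%5==0:
--     #         res+="-"
--     #         res+="/"
--     #     else:
--     #         res+="/"
--     # return(res)
--
--     x=''
--     for i in range(n):
--         if (i%5)!=0 or i==0 :
--             x+=('/')
--         elif (i%5)==0 and i!=0:
--             x+=('-')
--             x+='/'
--     return(x)
-- ===== SOURCE B (Python) =====
-- def f(n):
--     slashes = '/' * n
--     return '-'.join(slashes[i:i+5] for i in range(0, n, 5))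
-- ===== Notes on version B (the rewrite author's own statement) =====
-- stated objective: simpler
-- what changed: B replaces A's per-index loop with modulo branching by building the full slash string '/'*n once and joining its consecutive length-5 slices with '-'.
import Mathlib
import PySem

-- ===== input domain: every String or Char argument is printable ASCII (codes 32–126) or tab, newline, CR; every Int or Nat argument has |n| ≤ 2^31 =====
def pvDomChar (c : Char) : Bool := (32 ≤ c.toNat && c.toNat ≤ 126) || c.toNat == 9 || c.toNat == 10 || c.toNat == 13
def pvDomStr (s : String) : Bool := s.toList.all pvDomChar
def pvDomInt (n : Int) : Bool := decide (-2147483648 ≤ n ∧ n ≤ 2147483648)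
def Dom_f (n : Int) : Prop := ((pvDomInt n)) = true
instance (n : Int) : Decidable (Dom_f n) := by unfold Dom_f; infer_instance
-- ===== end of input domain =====

-- B builds '/' * n once and joins its length-5 slices with '-', instead of A's
-- per-index modulo branching; objective: simpler.

-- ===== PORT A =====
-- the loop body: if (i%5)!=0 or i==0: x+='/' elif (i%5)==0 and i!=0: x+='-'; x+='/'
def fStep (x : List Char) (i : Int) : List Char :=
  if PySem.Int.mod i 5 ≠ 0 ∨ i = 0 then x ++ ['/']
  else if PySem.Int.mod i 5 = 0 ∧ i ≠ 0 then (x ++ ['-']) ++ ['/']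
  else x

def f (n : Int) : String :=
  String.ofList ((PySem.List.pyRange 0 n 1).foldl fStep [])

-- ===== PORT B =====
def f_alt (n : Int) : String :=
  let slashes := PySem.List.pyRepeat ['/'] n
  String.ofList (PySem.Chars.join ['-']
    ((PySem.List.pyRange 0 n 5).map (fun i => PySem.List.slice slashes (some i) (some (i + 5)))))

-- ===== PRECONDITION & SPEC =====
def Spec_f (n : Int) (out : String) : Prop := out = f_alt n
instance (n : Int) (out : String) : Decidable (Spec_f n out) := by unfold Spec_f; infer_instance

-- ===== CLAIM (what is proved, stated in full; the proofs are below) =====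
def Claim_equal_f : Prop := ∀ (n : Int), Dom_f n → Spec_f n (f n)

-- ===== LEMMAS AND PROOFS =====

-- the character list A's loop builds after m iterations
def F : Nat → List Char
  | 0 => []
  | m + 1 => F m ++ (if m % 5 ≠ 0 ∨ m = 0 then ['/'] else ['-', '/'])

lemma fStep_natCast (x : List Char) (m : Nat) :
    fStep x (m : Int) = x ++ (if m % 5 ≠ 0 ∨ m = 0 then ['/'] else ['-', '/']) := by
  unfold fStep
  rw [show (5 : Int) = ((5 : Nat) : Int) from rfl, PySem.Int.mod_natCast]
  have hiff : (((m % 5 : Nat) : Int) ≠ 0 ∨ (m : Int) = 0) ↔ (m % 5 ≠ 0 ∨ m = 0) := by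
    simp only [ne_eq, Nat.cast_eq_zero]
  by_cases h : m % 5 ≠ 0 ∨ m = 0
  · rw [if_pos (hiff.mpr h), if_pos h]
  · rw [if_neg (fun hc => h (hiff.mp hc)), if_neg h]
    have h2 : ((m % 5 : Nat) : Int) = 0 ∧ (m : Int) ≠ 0 := by
      simp only [ne_eq, Nat.cast_eq_zero]; tauto
    rw [if_pos h2, List.append_assoc]
    rfl

lemma fA_chars (m : Nat) : (PySem.List.pyRange 0 (m : Int) 1).foldl fStep [] = F m := by
  induction m with
  | zero => simp [PySem.List.pyRange_one_eq_nil (le_refl 0), F]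
  | succ m ih =>
    have : ((m + 1 : Nat) : Int) = (m : Int) + 1 := by push_cast; ring
    rw [this, PySem.List.pyRange_one_succ_right (by positivity), List.foldl_append, ih]
    simp [fStep_natCast, F]

lemma F_add_five (k : Nat) :
    F (k + 5) = List.replicate 5 '/' ++ (if k = 0 then [] else '-' :: F k) := by
  induction k with
  | zero => decide
  | succ k ih =>
    show F (k + 5 + 1) = _
    rw [F, ih]
    have hm : (k + 5) % 5 = k % 5 := Nat.add_mod_right k 5
    by_cases hk : k = 0
    · subst hk; decide
    · have hks : ¬ (k + 1 = 0) := by omega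
      by_cases h5 : k % 5 = 0
      · simp [hm, h5, hk, F]
      · simp [hm, h5, hk, F]

-- B's chunk list, in closed form over Nat
def J (m : Nat) : List Char :=
  PySem.Chars.join ['-']
    ((List.range ((m + 4) / 5)).map (fun k => List.replicate (min 5 (m - 5 * k)) '/'))

lemma fB_chars (m : Nat) :
    PySem.Chars.join ['-']
      ((PySem.List.pyRange 0 (m : Int) 5).map
        (fun i => PySem.List.slice (List.replicate m '/') (some i) (some (i + 5)))) = J m := by
  rw [PySem.List.pyRange_of_pos 0 (m : Int) (by norm_num)]
  have hq : (if (0 : Int) < (m : Int) then (((m : Int) - 0 + 5 - 1) / 5).toNat else 0) = (m + 4) / 5 := by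
    by_cases hm : 0 < m
    · have : ((m : Int) - 0 + 5 - 1) = ((m + 4 : Nat) : Int) := by push_cast; ring
      rw [if_pos (by exact_mod_cast hm), this,
        show ((m + 4 : Nat) : Int) / 5 = (((m + 4) / 5 : Nat) : Int) from
          Eq.symm (Nat.ToInt.div_congr rfl rfl)]
      exact Int.toNat_natCast _
    · have hm0 : m = 0 := by omega
      subst hm0; simp
  rw [hq, List.map_map, J]
  congr 1
  apply List.map_congr_left
  intro k _
  show PySem.List.slice (List.replicate m '/') (some (0 + 5 * (k : Int))) (some (0 + 5 * (k : Int) + 5)) = _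
  have h1 : (0 : Int) + 5 * (k : Int) = ((5 * k : Nat) : Int) := by push_cast; ring
  have h2 : (0 : Int) + 5 * (k : Int) + 5 = ((5 * k : Nat) : Int) + ((5 : Nat) : Int) := by push_cast; ring
  rw [h2, h1, PySem.List.slice_natCast_add, List.drop_replicate, List.take_replicate]

lemma F_of_le_five (m : Nat) (h : m ≤ 5) : F m = List.replicate m '/' := by
  interval_cases m <;> decide

lemma J_eq_F (m : Nat) : J m = F m := by
  induction m using Nat.strong_induction_on with
  | _ m ih =>
    by_cases h5 : m ≤ 5
    · by_cases h0 : m = 0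
      · subst h0; decide
      · have hq : (m + 4) / 5 = 1 := by omega
        rw [J, hq, F_of_le_five m h5]
        simp [PySem.Chars.join_singleton, Nat.min_eq_right h5]
    · -- m > 5 : peel the first chunk of five
      obtain ⟨k, rfl⟩ : ∃ k, m = k + 5 := ⟨m - 5, by omega⟩
      have hk : 1 ≤ k := by omega
      have hq : (k + 5 + 4) / 5 = (k + 4) / 5 + 1 := by omega
      rw [J, hq, List.range_succ_eq_map, List.map_cons, List.map_map]
      have hc0 : List.replicate (min 5 (k + 5 - 5 * 0)) '/' = List.replicate 5 '/' := by
        norm_num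
      have htail : (List.range ((k + 4) / 5)).map
          ((fun j => List.replicate (min 5 (k + 5 - 5 * j)) '/') ∘ Nat.succ)
          = (List.range ((k + 4) / 5)).map (fun j => List.replicate (min 5 (k - 5 * j)) '/') := by
        apply List.map_congr_left
        intro j _
        show List.replicate (min 5 (k + 5 - 5 * (j + 1))) '/' = _
        congr 1; omega
      rw [hc0, htail]
      obtain ⟨q, hqq⟩ : ∃ q, (k + 4) / 5 = q + 1 := ⟨(k + 4) / 5 - 1, by omega⟩
      rw [hqq, List.range_succ_eq_map, List.map_cons,
        PySem.Chars.join_cons_cons, List.append_assoc]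
      have : PySem.Chars.join ['-']
          (List.replicate (min 5 (k - 5 * 0)) '/' ::
            (List.map Nat.succ (List.range q)).map (fun j => List.replicate (min 5 (k - 5 * j)) '/'))
          = J k := by
        rw [J, hqq, List.range_succ_eq_map, List.map_cons, List.map_map]
      rw [this, ih k (by omega), F_add_five]
      simp [show ¬ k = 0 by omega]

-- ===== VERDICT (by name: the statement is the Claim_ definition above) =====
theorem f_spec : Claim_equal_f := by
  intro n _
  unfold Spec_f f f_alt
  dsimp only
  by_cases hn : n ≤ 0
  · rw [PySem.List.pyRange_one_eq_nil hn,
      show PySem.List.pyRange 0 n 5 = [] from by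
        rw [PySem.List.pyRange_of_pos 0 n (by norm_num)]
        simp [show ¬ (0 : Int) < n from by omega]]
    simp [PySem.Chars.join_nil]
  · obtain ⟨m, rfl⟩ := Int.eq_ofNat_of_zero_le (by omega : (0 : Int) ≤ n)
    rw [fA_chars, PySem.List.pyRepeat_singleton, Int.toNat_natCast, fB_chars, J_eq_F]
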